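-- pv_equiv track=rewrite | github.com/jcolinpatrick/kryptos | scripts/e_s_61_noncolumnar_width7.py | diagonal_route_perm
-- ===== SOURCE A (Python) =====
-- def diagonal_route_perm(width, text_len, direction="down_right"):
--     """Diagonal route cipher on a grid."""
--     height = (text_len + width - 1) // width
--
--     # Fill grid
--     grid = {}
--     idx = 0
--     for row in range(height):
--         for col in range(width):
--             if idx < text_len:
--                 grid[(row, col)] = idx
--                 idx += 1
--
--     # Read diagonals
--     perm = []
--     if direction == "down_right":
--         # Read diagonals starting from top row then left column
--         for start in range(width + height - 1):
--             if start < width: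
--                 row, col = 0, start
--             else:
--                 row, col = start - width + 1, 0
--             while row < height and col < width:
--                 if (row, col) in grid:
--                     perm.append(grid[(row, col)])
--                 row += 1
--                 col += 1  # wrong, need to go the other direction too
--
--     elif direction == "down_left":
--         for start in range(width + height - 1):
--             if start < width:
--                 row, col = 0, width - 1 - start
--             else:
--                 row, col = start - width + 1, width - 1
--             while row < height and col >= 0:
--                 if (row, col) in grid:
--                     perm.append(grid[(row, col)])
--                 row += 1
--                 col -= 1
--
--     elif direction == "spiral":
--         # Spiral from outside in
--         visited = set()
--         row, col = 0, 0
--         dr, dc = 0, 1  # Start going right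
--         for _ in range(text_len):
--             if (row, col) in grid and (row, col) not in visited:
--                 perm.append(grid[(row, col)])
--                 visited.add((row, col))
--             # Try to continue in current direction
--             nr, nc = row + dr, col + dc
--             if (0 <= nr < height and 0 <= nc < width and
--                 (nr, nc) not in visited and (nr, nc) in grid):
--                 row, col = nr, nc
--             else:
--                 # Turn right
--                 dr, dc = dc, -dr
--                 row, col = row + dr, col + dc
--
--     if len(perm) != text_len or sorted(perm) != list(range(text_len)):
--         return None
--
--     return perm
-- ===== SOURCE B (Python) =====
-- def diagonal_route_perm(width, text_len, direction="down_right"):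
--     """Diagonal route cipher, gridless: cell (r, c) holds index r*width + c.
--     The diagonal routes are computed by one row-major pass that groups every
--     index into a bucket keyed by its diagonal (col - row, resp. col + row),
--     then the buckets are emitted in diagonal-start order; the spiral stays a
--     step simulation over arithmetic validity."""
--     height = (text_len + width - 1) // width
--
--     if direction == "down_right":
--         keys = list(range(width)) + [-r for r in range(1, height)]
--         buckets = {k: [] for k in keys}
--         for i in range(text_len):
--             buckets.setdefault(i % width - i // width, []).append(i)
--         perm = [i for k in keys for i in buckets[k]]
--     elif direction == "down_left":
--         keys = list(range(width - 1, -1, -1)) + list(range(width, width + height - 1))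
--         buckets = {k: [] for k in keys}
--         for i in range(text_len):
--             buckets.setdefault(i % width + i // width, []).append(i)
--         perm = [i for k in keys for i in buckets[k]]
--     elif direction == "spiral":
--         def valid(r, c):
--             return 0 <= r < height and 0 <= c < width and r * width + c < text_len
--         visited = set()
--         r, c, dr, dc = 0, 0, 0, 1
--         perm = []
--         for _ in range(text_len):
--             if valid(r, c) and (r, c) not in visited:
--                 perm.append(r * width + c)
--                 visited.add((r, c))
--             nr, nc = r + dr, c + dc
--             if not (valid(nr, nc) and (nr, nc) not in visited):
--                 dr, dc = dc, -dr
--                 nr, nc = r + dr, c + dc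
--             r, c = nr, nc
--     else:
--         perm = []
--
--     if len(perm) != text_len or sorted(perm) != list(range(text_len)):
--         return None
--     return perm
-- ===== Notes on version B (the rewrite author's own statement) =====
-- stated objective: faster
-- what changed: The grid dict and the per-diagonal cell-by-cell walks are gone: one row-major pass over the indices groups each index into a bucket keyed by its diagonal (col-row for down_right, col+row for down_left) and the buckets are then concatenated in the original diagonal-start order; the spiral branch simulates with arithmetic validity (r*width+c < text_len) instead of a grid lookup.
import Mathlib
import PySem

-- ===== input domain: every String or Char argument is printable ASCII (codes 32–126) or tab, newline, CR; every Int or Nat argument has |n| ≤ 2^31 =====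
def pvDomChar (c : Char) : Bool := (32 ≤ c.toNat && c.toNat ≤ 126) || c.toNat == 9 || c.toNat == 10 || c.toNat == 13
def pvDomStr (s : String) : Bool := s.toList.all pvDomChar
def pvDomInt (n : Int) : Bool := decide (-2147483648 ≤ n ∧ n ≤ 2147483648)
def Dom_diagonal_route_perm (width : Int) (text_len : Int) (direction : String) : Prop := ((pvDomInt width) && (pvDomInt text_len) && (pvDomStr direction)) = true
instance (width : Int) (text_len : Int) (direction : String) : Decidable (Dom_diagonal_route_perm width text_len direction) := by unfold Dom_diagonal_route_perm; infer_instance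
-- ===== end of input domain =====

-- B replaces A's grid dict and per-diagonal walks by one row-major pass that groups
-- each index into a bucket keyed by its diagonal, concatenated in diagonal-start order
-- (objective: alternative decomposition; the spiral branch stays a simulation).

-- ===== PORT A =====
-- grid fill: for row in range(height): for col in range(width): if idx < text_len: grid[(row,col)] = idx; idx += 1
def pvGridFill (width text_len height : Int) : PySem.Dict (Int × Int) Int × Int :=
  (PySem.List.pyRange 0 height 1).foldl (fun st row =>
    (PySem.List.pyRange 0 width 1).foldl (fun st col =>
      if st.2 < text_len then (st.1.insert (row, col) st.2, st.2 + 1) else st) st)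
    (PySem.Dict.empty, 0)

-- while row < height and col < width: if (row,col) in grid: perm.append(grid[(row,col)]); row += 1; col += 1
def pvWalkDR (grid : PySem.Dict (Int × Int) Int) (height width : Int) (row col : Int) (perm : List Int) : List Int :=
  if h : row < height ∧ col < width then
    pvWalkDR grid height width (row + 1) (col + 1)
      (if grid.contains (row, col) then perm ++ [grid.getD (row, col) 0] else perm)
  else perm
termination_by (height - row).toNat
decreasing_by omega

-- while row < height and col >= 0: if (row,col) in grid: perm.append(grid[(row,col)]); row += 1; col -= 1
def pvWalkDL (grid : PySem.Dict (Int × Int) Int) (height width : Int) (row col : Int) (perm : List Int) : List Int :=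
  if h : row < height ∧ 0 ≤ col then
    pvWalkDL grid height width (row + 1) (col - 1)
      (if grid.contains (row, col) then perm ++ [grid.getD (row, col) 0] else perm)
  else perm
termination_by (col + 1).toNat
decreasing_by omega

-- one iteration of A's spiral loop body (state: perm, visited, row, col, dr, dc)
def pvSpiralStepA (grid : PySem.Dict (Int × Int) Int) (height width : Int)
    (st : List Int × PySem.Set (Int × Int) × Int × Int × Int × Int) :
    List Int × PySem.Set (Int × Int) × Int × Int × Int × Int :=
  let (perm, visited, row, col, dr, dc) := st
  let pv := if grid.contains (row, col) && !(PySem.Set.contains visited (row, col)) then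
      (perm ++ [grid.getD (row, col) 0], PySem.Set.add visited (row, col)) else (perm, visited)
  let nr := row + dr
  let nc := col + dc
  if decide (0 ≤ nr) && decide (nr < height) && decide (0 ≤ nc) && decide (nc < width)
      && !(PySem.Set.contains pv.2 (nr, nc)) && grid.contains (nr, nc) then
    (pv.1, pv.2, nr, nc, dr, dc)
  else
    (pv.1, pv.2, row + dc, col + (-dr), dc, -dr)

def diagonal_route_perm (width : Int) (text_len : Int) (direction : String) : Option (List Int) :=
  let height := PySem.Int.floordiv (text_len + width - 1) width
  let grid := (pvGridFill width text_len height).1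
  let perm : List Int :=
    if direction = "down_right" then
      (PySem.List.pyRange 0 (width + height - 1) 1).foldl (fun perm start =>
        let rc := if start < width then ((0 : Int), start) else (start - width + 1, (0 : Int))
        pvWalkDR grid height width rc.1 rc.2 perm) []
    else if direction = "down_left" then
      (PySem.List.pyRange 0 (width + height - 1) 1).foldl (fun perm start =>
        let rc := if start < width then ((0 : Int), width - 1 - start) else (start - width + 1, width - 1)
        pvWalkDL grid height width rc.1 rc.2 perm) []
    else if direction = "spiral" then
      ((PySem.List.pyRange 0 text_len 1).foldl (fun st _ => pvSpiralStepA grid height width st)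
        ([], PySem.Set.empty, 0, 0, 0, 1)).1
    else []
  if PySem.List.len perm ≠ text_len ∨ PySem.List.sorted perm (fun x => x) false ≠ PySem.List.pyRange 0 text_len 1
  then none else some perm

-- ===== PORT B =====
-- keys = list(range(width)) + [-r for r in range(1, height)]
def pvKeysDR (width height : Int) : List Int :=
  PySem.List.pyRange 0 width 1 ++ (PySem.List.pyRange 1 height 1).map (fun r => -r)

-- keys = list(range(width - 1, -1, -1)) + list(range(width, width + height - 1))
def pvKeysDL (width height : Int) : List Int :=
  PySem.List.pyRange (width - 1) (-1) (-1) ++ PySem.List.pyRange width (width + height - 1) 1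

-- buckets = {k: [] for k in keys}; for i in range(text_len): buckets.setdefault(keyf(i), []).append(i)
def pvBuckets (keys : List Int) (keyf : Int → Int) (text_len : Int) : PySem.Dict Int (List Int) :=
  (PySem.List.pyRange 0 text_len 1).foldl (fun d i => d.modify (keyf i) [] (fun l => l ++ [i]))
    (keys.foldl (fun d k => d.insert k ([] : List Int)) PySem.Dict.empty)

-- def valid(r, c): return 0 <= r < height and 0 <= c < width and r*width + c < text_len
def pvValid (height width text_len r c : Int) : Bool :=
  decide (0 ≤ r) && decide (r < height) && decide (0 ≤ c) && decide (c < width)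
    && decide (r * width + c < text_len)

-- one iteration of B's spiral loop body
def pvSpiralStepB (height width text_len : Int)
    (st : List Int × PySem.Set (Int × Int) × Int × Int × Int × Int) :
    List Int × PySem.Set (Int × Int) × Int × Int × Int × Int :=
  let (perm, visited, row, col, dr, dc) := st
  let pv := if pvValid height width text_len row col && !(PySem.Set.contains visited (row, col)) then
      (perm ++ [row * width + col], PySem.Set.add visited (row, col)) else (perm, visited)
  let nr := row + dr
  let nc := col + dc
  if pvValid height width text_len nr nc && !(PySem.Set.contains pv.2 (nr, nc)) then
    (pv.1, pv.2, nr, nc, dr, dc)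
  else
    (pv.1, pv.2, row + dc, col + (-dr), dc, -dr)

def diagonal_route_perm_alt (width : Int) (text_len : Int) (direction : String) : Option (List Int) :=
  let height := PySem.Int.floordiv (text_len + width - 1) width
  let perm : List Int :=
    if direction = "down_right" then
      let keys := pvKeysDR width height
      let buckets := pvBuckets keys (fun i => PySem.Int.mod i width - PySem.Int.floordiv i width) text_len
      keys.flatMap (fun k => buckets.getD k [])
    else if direction = "down_left" then
      let keys := pvKeysDL width height
      let buckets := pvBuckets keys (fun i => PySem.Int.mod i width + PySem.Int.floordiv i width) text_len
      keys.flatMap (fun k => buckets.getD k [])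
    else if direction = "spiral" then
      ((PySem.List.pyRange 0 text_len 1).foldl (fun st _ => pvSpiralStepB height width text_len st)
        ([], PySem.Set.empty, 0, 0, 0, 1)).1
    else []
  if PySem.List.len perm ≠ text_len ∨ PySem.List.sorted perm (fun x => x) false ≠ PySem.List.pyRange 0 text_len 1
  then none else some perm

-- ===== PRECONDITION & SPEC =====
-- Pre_ excludes width = 0, where the Python A raises ZeroDivisionError computing the grid height.
def Pre_diagonal_route_perm (width : Int) (text_len : Int) (direction : String) : Prop := width ≠ 0
instance (width : Int) (text_len : Int) (direction : String) : Decidable (Pre_diagonal_route_perm width text_len direction) := by unfold Pre_diagonal_route_perm; infer_instance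
def pvWitness_diagonal_route_perm : Int × Int × String := (7, 20, "down_right")

def Spec_diagonal_route_perm (width : Int) (text_len : Int) (direction : String) (out : Option (List Int)) : Prop := out = diagonal_route_perm_alt width text_len direction
instance (width : Int) (text_len : Int) (direction : String) (out : Option (List Int)) : Decidable (Spec_diagonal_route_perm width text_len direction out) := by unfold Spec_diagonal_route_perm; infer_instance

-- ===== CLAIM (what is proved, stated in full; the proofs are below) =====
def Claim_equal_diagonal_route_perm : Prop := ∀ (width : Int) (text_len : Int) (direction : String), Dom_diagonal_route_perm width text_len direction → Pre_diagonal_route_perm width text_len direction → Spec_diagonal_route_perm width text_len direction (diagonal_route_perm width text_len direction)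

-- ===== LEMMAS AND PROOFS =====

-- ---- characterization of A's grid dict ----

-- inner column loop of the grid fill, one row R
lemma pvGridFill_inner (width text_len R : Int) (hw : 0 < width) (hR : 0 ≤ R)
    (g : PySem.Dict (Int × Int) Int) (n : Nat) :
    ((PySem.List.pyRange 0 (n : Int) 1).foldl (fun st col =>
        if st.2 < text_len then (st.1.insert (R, col) st.2, st.2 + 1) else st)
      (g, min (R * width) (max text_len 0))).2 = min (R * width + (n : Int)) (max text_len 0) ∧
    ∀ p : Int × Int,
      ((PySem.List.pyRange 0 (n : Int) 1).foldl (fun st col =>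
          if st.2 < text_len then (st.1.insert (R, col) st.2, st.2 + 1) else st)
        (g, min (R * width) (max text_len 0))).1.get? p =
      if p.1 = R ∧ 0 ≤ p.2 ∧ p.2 < (n : Int) ∧ R * width + p.2 < text_len
      then some (R * width + p.2) else g.get? p := by
  induction n with
  | zero =>
    constructor
    · simp [PySem.List.pyRange_one_eq_nil]
    · intro p
      rw [if_neg (by omega)]
      simp [PySem.List.pyRange_one_eq_nil]
  | succ n ih =>
    have hx0 : 0 ≤ R * width + (n : Int) := by positivity
    have hsplit : PySem.List.pyRange 0 ((n : Int) + 1) 1 =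
        PySem.List.pyRange 0 (n : Int) 1 ++ [(n : Int)] :=
      PySem.List.pyRange_one_succ_right (by omega)
    have hcast : ((n + 1 : Nat) : Int) = (n : Int) + 1 := by push_cast; ring
    rw [hcast, hsplit, List.foldl_append]
    obtain ⟨ihidx, ihget⟩ := ih
    set res := (PySem.List.pyRange 0 (n : Int) 1).foldl (fun st col =>
        if st.2 < text_len then (st.1.insert (R, col) st.2, st.2 + 1) else st)
      (g, min (R * width) (max text_len 0)) with hres
    have hpair : res = (res.1, res.2) := rfl
    by_cases hlt : R * width + (n : Int) < text_len
    · have hidx : res.2 = R * width + (n : Int) := by omega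
      constructor
      · simp only [List.foldl_cons, List.foldl_nil]
        rw [if_pos (by omega)]
        simp only []
        omega
      · intro p
        simp only [List.foldl_cons, List.foldl_nil]
        rw [if_pos (by omega)]
        simp only []
        rw [PySem.Dict.get?_insert, ihget]
        by_cases hp : p = (R, (n : Int))
        · subst hp
          rw [if_pos rfl, if_pos (by simp; omega)]
          simp [hidx]
        · rw [if_neg hp]
          have hne : ¬(p.1 = R ∧ p.2 = (n : Int)) := by
            intro ⟨h1, h2⟩; exact hp (Prod.ext h1 h2)
          by_cases hc : p.1 = R ∧ 0 ≤ p.2 ∧ p.2 < (n : Int) ∧ R * width + p.2 < text_len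
          · rw [if_pos hc, if_pos (by omega)]
          · rw [if_neg hc, if_neg (by intro hcc; exact hc ⟨hcc.1, hcc.2.1, by
              rcases hcc with ⟨h1, h2, h3, h4⟩
              have : p.2 ≠ (n : Int) := fun he => hne ⟨h1, he⟩
              omega, hcc.2.2.2⟩)]
    · have hidx : res.2 = max text_len 0 := by omega
      constructor
      · simp only [List.foldl_cons, List.foldl_nil]
        rw [if_neg (by omega)]
        omega
      · intro p
        simp only [List.foldl_cons, List.foldl_nil]
        rw [if_neg (by omega)]
        rw [ihget]
        by_cases hc : p.1 = R ∧ 0 ≤ p.2 ∧ p.2 < (n : Int) ∧ R * width + p.2 < text_len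
        · rw [if_pos hc, if_pos (by omega)]
        · rw [if_neg hc, if_neg (by
            intro ⟨h1, h2, h3, h4⟩
            exact hc ⟨h1, h2, by omega, h4⟩)]

-- outer row loop of the grid fill
lemma pvGridFill_outer (width text_len : Int) (hw : 0 < width) (m : Nat) :
    ((PySem.List.pyRange 0 (m : Int) 1).foldl (fun st row =>
        (PySem.List.pyRange 0 width 1).foldl (fun st col =>
          if st.2 < text_len then (st.1.insert (row, col) st.2, st.2 + 1) else st) st)
      (PySem.Dict.empty, 0)).2 = min ((m : Int) * width) (max text_len 0) ∧
    ∀ p : Int × Int,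
      ((PySem.List.pyRange 0 (m : Int) 1).foldl (fun st row =>
          (PySem.List.pyRange 0 width 1).foldl (fun st col =>
            if st.2 < text_len then (st.1.insert (row, col) st.2, st.2 + 1) else st) st)
        (PySem.Dict.empty, 0)).1.get? p =
      if 0 ≤ p.1 ∧ p.1 < (m : Int) ∧ 0 ≤ p.2 ∧ p.2 < width ∧ p.1 * width + p.2 < text_len
      then some (p.1 * width + p.2) else none := by
  induction m with
  | zero =>
    constructor
    · simp [PySem.List.pyRange_one_eq_nil]
    · intro p
      rw [if_neg (by omega)]
      simp [PySem.List.pyRange_one_eq_nil]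
  | succ m ih =>
    have hsplit : PySem.List.pyRange 0 ((m : Int) + 1) 1 =
        PySem.List.pyRange 0 (m : Int) 1 ++ [(m : Int)] :=
      PySem.List.pyRange_one_succ_right (by omega)
    have hcast : ((m + 1 : Nat) : Int) = (m : Int) + 1 := by push_cast; ring
    rw [hcast, hsplit, List.foldl_append]
    obtain ⟨ihidx, ihget⟩ := ih
    set res := (PySem.List.pyRange 0 (m : Int) 1).foldl (fun st row =>
        (PySem.List.pyRange 0 width 1).foldl (fun st col =>
          if st.2 < text_len then (st.1.insert (row, col) st.2, st.2 + 1) else st) st)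
      (PySem.Dict.empty, 0) with hres
    have hpair : res = (res.1, res.2) := rfl
    have hwidth : ((width.toNat : Nat) : Int) = width := Int.toNat_of_nonneg (by omega)
    have hinner := pvGridFill_inner width text_len (m : Int) hw (by omega) res.1 width.toNat
    rw [hwidth] at hinner
    obtain ⟨hi1, hi2⟩ := hinner
    have hstart : (res.1, min ((m : Int) * width) (max text_len 0)) = res := by
      rw [hpair, ihidx]
    rw [hstart] at hi1 hi2
    simp only [List.foldl_cons, List.foldl_nil]
    constructor
    · rw [hi1]; ring_nf
    · intro p
      rw [hi2]
      by_cases hc : p.1 = (m : Int) ∧ 0 ≤ p.2 ∧ p.2 < width ∧ (m : Int) * width + p.2 < text_len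
      · rw [if_pos hc, if_pos (by obtain ⟨h1, h2, h3, h4⟩ := hc; refine ⟨by omega, by omega, h2, h3, by rw [h1]; exact h4⟩)]
        rw [hc.1]
      · rw [if_neg hc, ihget]
        by_cases hc2 : 0 ≤ p.1 ∧ p.1 < (m : Int) ∧ 0 ≤ p.2 ∧ p.2 < width ∧ p.1 * width + p.2 < text_len
        · rw [if_pos hc2, if_pos (by obtain ⟨h1, h2, h3, h4, h5⟩ := hc2; exact ⟨h1, by omega, h3, h4, h5⟩)]
        · rw [if_neg hc2, if_neg (by
            rintro ⟨h1, h2, h3, h4, h5⟩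
            by_cases hpm : p.1 = (m : Int)
            · exact hc ⟨hpm, h3, h4, by rw [← hpm]; exact h5⟩
            · exact hc2 ⟨h1, by omega, h3, h4, h5⟩)]

-- the grid dict of A: cell (r,c) present iff in bounds with row-major index < text_len
lemma grid_get (width text_len height r c : Int) :
    (pvGridFill width text_len height).1.get? (r, c) =
    if 0 ≤ r ∧ r < height ∧ 0 ≤ c ∧ c < width ∧ r * width + c < text_len
    then some (r * width + c) else none := by
  by_cases hw : 0 < width
  · by_cases hh : 0 < height
    · have hcast : ((height.toNat : Nat) : Int) = height := Int.toNat_of_nonneg (by omega)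
      have h := (pvGridFill_outer width text_len hw height.toNat).2 (r, c)
      rw [hcast] at h
      unfold pvGridFill
      exact h
    · have hnil : PySem.List.pyRange 0 height 1 = [] := PySem.List.pyRange_one_eq_nil (by omega)
      unfold pvGridFill
      rw [hnil]
      simp only [List.foldl_nil]
      rw [if_neg (by omega)]
      simp
  · have hnil : PySem.List.pyRange 0 width 1 = [] := PySem.List.pyRange_one_eq_nil (by omega)
    unfold pvGridFill
    rw [hnil]
    simp only [List.foldl_nil]
    rw [if_neg (by omega), PySem.List.foldl_ignore]
    simp

lemma grid_contains (width text_len height r c : Int) :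
    (pvGridFill width text_len height).1.contains (r, c) = pvValid height width text_len r c := by
  rw [Bool.eq_iff_iff, PySem.Dict.contains_eq_isSome_get?, grid_get]
  by_cases h : 0 ≤ r ∧ r < height ∧ 0 ≤ c ∧ c < width ∧ r * width + c < text_len
  · rw [if_pos h]
    simp [pvValid, h.1, h.2.1, h.2.2.1, h.2.2.2.1, h.2.2.2.2]
  · rw [if_neg h]
    simp only [Option.isSome_none, Bool.false_eq_true, false_iff, pvValid]
    simp only [Bool.and_eq_true, decide_eq_true_eq, not_and]
    intro h1 h2
    exact h ⟨h1.1.1.1, h1.1.1.2, h1.1.2, h1.2, h2⟩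

lemma grid_getD (width text_len height r c : Int)
    (h : 0 ≤ r ∧ r < height ∧ 0 ≤ c ∧ c < width ∧ r * width + c < text_len) :
    (pvGridFill width text_len height).1.getD (r, c) 0 = r * width + c := by
  rw [PySem.Dict.getD_eq_get?_getD, grid_get, if_pos h]
  rfl

-- A's down-right diagonal walk from (r, r+k) appends the valid cells of the diagonal
lemma walkDR_eq (width text_len height k : Int) : ∀ (fuel : Nat) (r : Int) (perm : List Int),
    (height - r).toNat = fuel → 0 ≤ r → 0 ≤ r + k →
    pvWalkDR (pvGridFill width text_len height).1 height width r (r + k) perm =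
    (PySem.List.pyRange r (min height (width - k)) 1).foldl (fun perm r' =>
      if r' * (width + 1) + k < text_len then perm ++ [r' * (width + 1) + k] else perm) perm := by
  intro fuel
  induction fuel with
  | zero =>
    intro r perm hfuel hr hc
    rw [pvWalkDR, dif_neg (by omega), PySem.List.pyRange_one_eq_nil (by omega)]
    rfl
  | succ n ih =>
    intro r perm hfuel hr hc
    rw [pvWalkDR]
    by_cases h : r < height ∧ r + k < width
    · rw [dif_pos h]
      rw [PySem.List.pyRange_one_cons (by omega), List.foldl_cons]
      rw [grid_contains]
      have harith : r * (width + 1) + k = r * width + (r + k) := by ring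
      rw [harith]
      have hval : pvValid height width text_len r (r + k) = decide (r * width + (r + k) < text_len) := by
        simp only [pvValid, hr, h.1, hc, h.2, decide_true, Bool.true_and, Bool.and_true]
      rw [hval]
      have hrec : r + k + 1 = (r + 1) + k := by ring
      rw [hrec]
      rw [ih (r + 1) _ (by omega) (by omega) (by omega)]
      congr 1
      by_cases ht : r * width + (r + k) < text_len
      · rw [if_pos (decide_eq_true ht), if_pos ht,
          grid_getD width text_len height r (r + k) ⟨hr, h.1, hc, h.2, ht⟩]
      · rw [if_neg (by simp [ht]), if_neg ht]
    · rw [dif_neg h, PySem.List.pyRange_one_eq_nil (by omega)]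
      rfl

-- A's down-left diagonal walk, parametrized by the constant diagonal sum m = row + col
lemma walkDL_aux (width text_len height m : Int) : ∀ (fuel : Nat) (r : Int) (perm : List Int),
    (m + 1 - r).toNat = fuel → 0 ≤ r → m - r < width →
    pvWalkDL (pvGridFill width text_len height).1 height width r (m - r) perm =
    (PySem.List.pyRange r (min height (m + 1)) 1).foldl (fun perm r' =>
      if r' * (width - 1) + m < text_len then perm ++ [r' * (width - 1) + m] else perm) perm := by
  intro fuel
  induction fuel with
  | zero =>
    intro r perm hfuel hr hcw
    rw [pvWalkDL, dif_neg (by omega), PySem.List.pyRange_one_eq_nil (by omega)]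
    rfl
  | succ n ih =>
    intro r perm hfuel hr hcw
    rw [pvWalkDL]
    by_cases h : r < height ∧ 0 ≤ m - r
    · rw [dif_pos h]
      rw [PySem.List.pyRange_one_cons (by omega), List.foldl_cons]
      rw [grid_contains]
      have harith : r * (width - 1) + m = r * width + (m - r) := by ring
      rw [harith]
      have hval : pvValid height width text_len r (m - r) = decide (r * width + (m - r) < text_len) := by
        simp only [pvValid, hr, h.1, h.2, hcw, decide_true, Bool.true_and, Bool.and_true]
      rw [hval]
      have hrec : m - r - 1 = m - (r + 1) := by ring
      rw [hrec]
      rw [ih (r + 1) _ (by omega) (by omega) (by omega)]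
      congr 1
      by_cases ht : r * width + (m - r) < text_len
      · rw [if_pos (decide_eq_true ht), if_pos ht,
          grid_getD width text_len height r (m - r) ⟨hr, h.1, h.2, hcw, ht⟩]
      · rw [if_neg (by simp [ht]), if_neg ht]
    · rw [dif_neg h, PySem.List.pyRange_one_eq_nil (by omega)]
      rfl

-- wrapper in the (r0, c0) form A's branch uses
lemma walkDL_eq (width text_len height r0 c0 : Int) (perm : List Int)
    (hr : 0 ≤ r0) (hcw : c0 < width) :
    pvWalkDL (pvGridFill width text_len height).1 height width r0 c0 perm =
    (PySem.List.pyRange r0 (min height (r0 + c0 + 1)) 1).foldl (fun perm r =>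
      if r * (width - 1) + r0 + c0 < text_len then perm ++ [r * (width - 1) + r0 + c0] else perm) perm := by
  have h := walkDL_aux width text_len height (r0 + c0) (r0 + c0 + 1 - r0).toNat r0 perm rfl hr (by omega)
  rw [show r0 + c0 - r0 = c0 from by ring] at h
  rw [h]
  have hf : (fun (perm : List Int) (r' : Int) =>
      if r' * (width - 1) + (r0 + c0) < text_len then perm ++ [r' * (width - 1) + (r0 + c0)] else perm) =
      (fun (perm : List Int) (r : Int) =>
      if r * (width - 1) + r0 + c0 < text_len then perm ++ [r * (width - 1) + r0 + c0] else perm) := by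
    funext perm r
    rw [add_assoc]
  rw [hf]

-- one spiral iteration of A equals one of B (the grid lookup is the arithmetic validity test)
lemma spiralStep_eq (width text_len height : Int)
    (st : List Int × PySem.Set (Int × Int) × Int × Int × Int × Int) :
    pvSpiralStepA (pvGridFill width text_len height).1 height width st =
    pvSpiralStepB height width text_len st := by
  obtain ⟨perm, visited, row, col, dr, dc⟩ := st
  simp only [pvSpiralStepA, pvSpiralStepB, grid_contains]
  have hmove : ∀ (vis : PySem.Set (Int × Int)) (nr nc : Int),
      (decide (0 ≤ nr) && decide (nr < height) && decide (0 ≤ nc) && decide (nc < width)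
        && !(PySem.Set.contains vis (nr, nc)) && pvValid height width text_len nr nc) =
      (pvValid height width text_len nr nc && !(PySem.Set.contains vis (nr, nc))) := by
    intro vis nr nc
    rw [Bool.eq_iff_iff]
    simp only [pvValid, Bool.and_eq_true, Bool.not_eq_eq_eq_not, Bool.not_true, decide_eq_true_eq]
    tauto
  have happ :
      (if pvValid height width text_len row col && !(PySem.Set.contains visited (row, col)) then
        (perm ++ [(pvGridFill width text_len height).1.getD (row, col) 0], PySem.Set.add visited (row, col))
      else (perm, visited)) =
      (if pvValid height width text_len row col && !(PySem.Set.contains visited (row, col)) then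
        (perm ++ [row * width + col], PySem.Set.add visited (row, col))
      else (perm, visited)) := by
    by_cases hv : (pvValid height width text_len row col && !(PySem.Set.contains visited (row, col))) = true
    · rw [if_pos hv, if_pos hv]
      have hcond : 0 ≤ row ∧ row < height ∧ 0 ≤ col ∧ col < width ∧ row * width + col < text_len := by
        simp only [pvValid, Bool.and_eq_true, decide_eq_true_eq] at hv
        exact ⟨hv.1.1.1.1.1, hv.1.1.1.1.2, hv.1.1.1.2, hv.1.1.2, hv.1.2⟩
      rw [grid_getD width text_len height row col hcond]
    · rw [if_neg hv, if_neg hv]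
  rw [happ, hmove]

lemma branchSpiral (width text_len height : Int) :
    ((PySem.List.pyRange 0 text_len 1).foldl
        (fun st _ => pvSpiralStepA (pvGridFill width text_len height).1 height width st)
        ([], PySem.Set.empty, 0, 0, 0, 1)).1 =
    ((PySem.List.pyRange 0 text_len 1).foldl
        (fun st _ => pvSpiralStepB height width text_len st)
        ([], PySem.Set.empty, 0, 0, 0, 1)).1 := by
  have hf : (fun (st : List Int × PySem.Set (Int × Int) × Int × Int × Int × Int) (_ : Int) =>
      pvSpiralStepA (pvGridFill width text_len height).1 height width st) =
      (fun st _ => pvSpiralStepB height width text_len st) := by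
    funext st x
    exact spiralStep_eq width text_len height st
  rw [hf]

-- ---- arithmetic facts about the grid height ----

lemma height_mul_ge (W N : Int) (hW : 0 < W) : N ≤ PySem.Int.floordiv (N + W - 1) W * W := by
  have h1 := PySem.Int.floordiv_mul_add_mod (N + W - 1) W
  have h2 := PySem.Int.mod_nonneg (N + W - 1) hW
  have h3 := PySem.Int.mod_lt (N + W - 1) hW
  omega

lemma height_pos (W N : Int) (hW : 0 < W) (hN : 0 < N) : 1 ≤ PySem.Int.floordiv (N + W - 1) W := by
  rw [PySem.Int.le_floordiv_iff_mul_le hW]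
  omega

lemma height_le_one_of_neg (W N : Int) (hW : W < 0) (hN : 0 < N) :
    PySem.Int.floordiv (N + W - 1) W ≤ 1 := by
  by_contra hc
  have hc2 : 2 ≤ PySem.Int.floordiv (N + W - 1) W := by omega
  have h1 := PySem.Int.floordiv_mul_add_mod (N + W - 1) W
  have h2 := (PySem.Int.mod_neg_bounds (N + W - 1) hW).1
  have h3 := (PySem.Int.mod_neg_bounds (N + W - 1) hW).2
  set H := PySem.Int.floordiv (N + W - 1) W with hH
  have : H * W ≤ 2 * W := by nlinarith
  omega

-- decomposition of an index i into row and column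
lemma idx_split (W i : Int) (hW : 0 < W) (hi : 0 ≤ i) :
    0 ≤ PySem.Int.floordiv i W ∧ 0 ≤ PySem.Int.mod i W ∧ PySem.Int.mod i W < W ∧
    PySem.Int.floordiv i W * W + PySem.Int.mod i W = i := by
  refine ⟨?_, PySem.Int.mod_nonneg i hW, PySem.Int.mod_lt i hW, PySem.Int.floordiv_mul_add_mod i W⟩
  rw [PySem.Int.floordiv_eq_ediv_of_pos hW]
  exact Int.ediv_nonneg hi (le_of_lt hW)

-- floordiv/mod of r*W + c for a cell in row r, column c
lemma key_inv (W r c : Int) (hW : 0 < W) (hr : 0 ≤ r) (hc : 0 ≤ c) (hcW : c < W) :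
    PySem.Int.floordiv (r * W + c) W = r ∧ PySem.Int.mod (r * W + c) W = c := by
  have hd : PySem.Int.floordiv (r * W + c) W = r := by
    rw [PySem.Int.floordiv_eq_iff_of_pos hW]
    constructor
    · nlinarith
    · nlinarith
  refine ⟨hd, ?_⟩
  have := PySem.Int.floordiv_mul_add_mod (r * W + c) W
  rw [hd] at this
  omega

-- ---- B's buckets: the final list at key c is the row-major filter of the indices ----

lemma pvInit_getD (keys : List Int) (c : Int) :
    (keys.foldl (fun d k => d.insert k ([] : List Int)) PySem.Dict.empty).getD c [] = [] := by
  suffices h : ∀ d : PySem.Dict Int (List Int), d.getD c [] = [] →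
      (keys.foldl (fun d k => d.insert k ([] : List Int)) d).getD c [] = [] by
    exact h _ (by simp [PySem.Dict.getD_empty])
  induction keys with
  | nil => intro d hd; simpa using hd
  | cons k ks ih =>
    intro d hd
    simp only [List.foldl_cons]
    apply ih
    rw [PySem.Dict.getD_insert]
    split <;> simp [hd]

lemma buckets_getD (keys : List Int) (keyf : Int → Int) (N c : Int) :
    (pvBuckets keys keyf N).getD c [] =
    (PySem.List.pyRange 0 N 1).filter (fun i => keyf i == c) := by
  unfold pvBuckets
  have hmap : (PySem.List.pyRange 0 N 1).foldl (fun d i => d.modify (keyf i) [] (fun l => l ++ [i]))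
      (keys.foldl (fun d k => d.insert k ([] : List Int)) PySem.Dict.empty) =
      ((PySem.List.pyRange 0 N 1).map (fun i => (keyf i, i))).foldl
        (fun d p => d.modify p.1 [] (fun l => l ++ [p.2]))
        (keys.foldl (fun d k => d.insert k ([] : List Int)) PySem.Dict.empty) := by
    rw [List.foldl_map]
  rw [hmap, PySem.Dict.getD_foldl_modify_append, pvInit_getD, List.filter_map, List.map_map]
  simp [Function.comp_def]

-- ---- A's diagonal segments, in filtered/mapped form (down_right / down_left) ----

def pvSegDR (W N H s : Int) : List Int :=
  let k := if s < W then s else -(s - W + 1)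
  let r0 := if s < W then 0 else s - W + 1
  ((PySem.List.pyRange r0 (min H (W - k)) 1).filter (fun r => decide (r * (W + 1) + k < N))).map
    (fun r => r * (W + 1) + k)

def pvSegDL (W N H s : Int) : List Int :=
  let m := if s < W then W - 1 - s else s
  let r0 := if s < W then 0 else s - W + 1
  ((PySem.List.pyRange r0 (min H (m + 1)) 1).filter (fun r => decide (r * (W - 1) + m < N))).map
    (fun r => r * (W - 1) + m)

-- two strictly increasing lists with the same members are equal
lemma eq_of_mem_iff_pairwise_lt (L1 L2 : List Int)
    (h1 : L1.Pairwise (· < ·)) (h2 : L2.Pairwise (· < ·))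
    (hm : ∀ x, x ∈ L1 ↔ x ∈ L2) : L1 = L2 := by
  have hn1 : L1.Nodup := h1.imp (fun h => ne_of_lt h)
  have hn2 : L2.Nodup := h2.imp (fun h => ne_of_lt h)
  have hperm : L2.Perm L1 := (List.perm_ext_iff_of_nodup hn2 hn1).mpr (fun a => (hm a).symm)
  have e1 := PySem.List.sorted_eq_of_perm_of_pairwise_lt L1 L1 (fun x => x) (List.Perm.refl L1) h1
  have e2 := PySem.List.sorted_eq_of_perm_of_pairwise_lt L1 L2 (fun x => x) hperm h2
  rw [e1] at e2
  exact e2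

-- the bucket of a down-right diagonal key is A's walk output along that diagonal
lemma F_DR (W N k r0 : Int) (hW : 0 < W) (hr0 : r0 = max 0 (-k)) :
    (PySem.List.pyRange 0 N 1).filter
      (fun i => (PySem.Int.mod i W - PySem.Int.floordiv i W) == k) =
    ((PySem.List.pyRange r0 (min (PySem.Int.floordiv (N + W - 1) W) (W - k)) 1).filter
      (fun r => decide (r * (W + 1) + k < N))).map (fun r => r * (W + 1) + k) := by
  set H := PySem.Int.floordiv (N + W - 1) W with hH
  apply eq_of_mem_iff_pairwise_lt
  · exact (PySem.List.pairwise_lt_pyRange_one 0 N).filter _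
  · rw [List.pairwise_map]
    refine List.Pairwise.imp (fun {a b} hab => ?_) ((PySem.List.pairwise_lt_pyRange_one _ _).filter _)
    have hba := mul_pos (show (0:Int) < b - a by omega) (show (0:Int) < W + 1 by omega)
    nlinarith
  · intro i
    simp only [List.mem_filter, List.mem_map, PySem.List.mem_pyRange_one, beq_iff_eq,
      decide_eq_true_eq]
    constructor
    · rintro ⟨⟨hi0, hiN⟩, hkey⟩
      obtain ⟨hr, hc0, hcW, hsplit⟩ := idx_split W i hW hi0
      set r := PySem.Int.floordiv i W with hrdef
      set c := PySem.Int.mod i W with hcdef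
      have hNH : N ≤ H * W := height_mul_ge W N hW
      have hrW : r * W < H * W := by linarith
      have hrH : r < H := lt_of_mul_lt_mul_right hrW (le_of_lt hW)
      have hieq : r * (W + 1) + k = i := by linear_combination hsplit - hkey
      exact ⟨r, ⟨⟨⟨by omega, lt_min hrH (by omega)⟩, by rw [hieq]; exact hiN⟩, hieq⟩⟩
    · rintro ⟨r, ⟨⟨hrlo, hrhi⟩, hiN⟩, hieq⟩
      have hrmin := lt_min_iff.mp hrhi
      have hieq' : i = r * W + (r + k) := by linear_combination -hieq
      have hr0le : (0:Int) ≤ r := by omega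
      have hrk : (0:Int) ≤ r + k := by omega
      have h0W : (0:Int) ≤ r * W := mul_nonneg (by omega) (by omega)
      have hb : r * (W + 1) = r * W + r := by ring
      obtain ⟨hd, hm⟩ := key_inv W r (r + k) hW (by omega) (by omega) (by omega)
      refine ⟨⟨by linarith, by linarith⟩, ?_⟩
      rw [hieq', hm, hd]
      omega

-- the bucket of a down-left diagonal key is A's walk output along that diagonal
lemma F_DL (W N m r0 : Int) (hW : 0 < W) (hr0 : r0 = max 0 (m - W + 1)) :
    (PySem.List.pyRange 0 N 1).filter
      (fun i => (PySem.Int.mod i W + PySem.Int.floordiv i W) == m) =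
    ((PySem.List.pyRange r0 (min (PySem.Int.floordiv (N + W - 1) W) (m + 1)) 1).filter
      (fun r => decide (r * (W - 1) + m < N))).map (fun r => r * (W - 1) + m) := by
  set H := PySem.Int.floordiv (N + W - 1) W with hH
  apply eq_of_mem_iff_pairwise_lt
  · exact (PySem.List.pairwise_lt_pyRange_one 0 N).filter _
  · rw [List.pairwise_map]
    refine List.Pairwise.imp_of_mem (fun {a b} ha hb hab => ?_)
      ((PySem.List.pairwise_lt_pyRange_one _ _).filter _)
    have ha' := PySem.List.mem_pyRange_one.mp (List.mem_of_mem_filter ha)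
    have hb' := PySem.List.mem_pyRange_one.mp (List.mem_of_mem_filter hb)
    have hbm := lt_min_iff.mp hb'.2
    have hd1 : b - a ≤ W - 1 := by omega
    have hba : (0:Int) < b - a := by omega
    have hw1 : (0:Int) < W - 1 := by omega
    nlinarith [mul_pos hba hw1]
  · intro i
    simp only [List.mem_filter, List.mem_map, PySem.List.mem_pyRange_one, beq_iff_eq,
      decide_eq_true_eq]
    constructor
    · rintro ⟨⟨hi0, hiN⟩, hkey⟩
      obtain ⟨hr, hc0, hcW, hsplit⟩ := idx_split W i hW hi0
      set r := PySem.Int.floordiv i W with hrdef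
      set c := PySem.Int.mod i W with hcdef
      have hNH : N ≤ H * W := height_mul_ge W N hW
      have hrW : r * W < H * W := by linarith
      have hrH : r < H := lt_of_mul_lt_mul_right hrW (le_of_lt hW)
      have hieq : r * (W - 1) + m = i := by linear_combination hsplit - hkey
      exact ⟨r, ⟨⟨⟨by omega, lt_min hrH (by omega)⟩, by rw [hieq]; exact hiN⟩, hieq⟩⟩
    · rintro ⟨r, ⟨⟨hrlo, hrhi⟩, hiN⟩, hieq⟩
      have hrmin := lt_min_iff.mp hrhi
      have hieq' : i = r * W + (m - r) := by linear_combination -hieq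
      have h0W : (0:Int) ≤ r * W := mul_nonneg (by omega) (by omega)
      have hb : r * (W - 1) = r * W - r := by ring
      obtain ⟨hd, hm⟩ := key_inv W r (m - r) hW (by omega) (by omega) (by omega)
      refine ⟨⟨by linarith, by linarith⟩, ?_⟩
      rw [hieq', hm, hd]
      omega

-- ---- key-list correspondences ----

lemma keysDR_eq (W H : Int) (hW : 0 < W) (hH : 1 ≤ H) :
    pvKeysDR W H = (PySem.List.pyRange 0 (W + H - 1) 1).map
      (fun s => if s < W then s else -(s - W + 1)) := by
  rw [PySem.List.pyRange_one_append 0 W (W + H - 1) (by omega) (by omega), List.map_append]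
  unfold pvKeysDR
  congr 1
  · rw [List.map_congr_left (g := fun s => s) (fun s hs => by
      rw [if_pos (PySem.List.mem_pyRange_one.mp hs).2]), List.map_id']
  · rw [PySem.List.pyRange_one 1 H, PySem.List.pyRange_one W (W + H - 1), List.map_map,
      List.map_map]
    have hlen : (H - 1).toNat = (W + H - 1 - W).toNat := by omega
    rw [hlen]
    apply List.map_congr_left
    intro a _
    simp only [Function.comp]
    rw [if_neg (by omega)]
    omega

lemma keysDL_eq (W H : Int) (hW : 0 < W) (hH : 1 ≤ H) :
    pvKeysDL W H = (PySem.List.pyRange 0 (W + H - 1) 1).map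
      (fun s => if s < W then W - 1 - s else s) := by
  rw [PySem.List.pyRange_one_append 0 W (W + H - 1) (by omega) (by omega), List.map_append]
  unfold pvKeysDL
  congr 1
  · rw [PySem.List.pyRange_neg_one (W - 1) (-1), PySem.List.pyRange_one 0 W, List.map_map]
    have hlen : (W - 1 - -1).toNat = (W - 0).toNat := by omega
    rw [hlen]
    apply List.map_congr_left
    intro a ha
    simp only [List.mem_range] at ha
    simp only [Function.comp]
    rw [if_pos (by omega)]
    omega
  · rw [List.map_congr_left (g := fun s => s) (fun s hs => by
      rw [if_neg (by have := (PySem.List.mem_pyRange_one.mp hs).1; omega)]), List.map_id']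

-- ---- the diagonal segments are empty when text_len ≤ 0 ----

lemma segDR_nil (W N H s : Int) (hW : 0 < W) (hN : N ≤ 0) (hs : 0 ≤ s) :
    pvSegDR W N H s = [] := by
  unfold pvSegDR
  by_cases hcase : s < W
  · simp only [if_pos hcase]
    have hfil : (PySem.List.pyRange 0 (min H (W - s)) 1).filter
        (fun r => decide (r * (W + 1) + s < N)) = [] := by
      rw [List.filter_eq_nil_iff]
      intro r hr
      have hmem := PySem.List.mem_pyRange_one.mp hr
      simp only [decide_eq_true_eq, not_lt]
      have h1 : (0:Int) ≤ r * (W + 1) := mul_nonneg hmem.1 (by omega)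
      omega
    rw [hfil, List.map_nil]
  · simp only [if_neg hcase]
    have hfil : (PySem.List.pyRange (s - W + 1) (min H (W - -(s - W + 1))) 1).filter
        (fun r => decide (r * (W + 1) + -(s - W + 1) < N)) = [] := by
      rw [List.filter_eq_nil_iff]
      intro r hr
      have hmem := PySem.List.mem_pyRange_one.mp hr
      simp only [decide_eq_true_eq, not_lt]
      have h1 : (s - W + 1) * (W + 1) ≤ r * (W + 1) :=
        mul_le_mul_of_nonneg_right hmem.1 (by omega)
      have h2 : (0:Int) ≤ (s - W + 1) * W := mul_nonneg (by omega) (by omega)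
      nlinarith
    rw [hfil, List.map_nil]

lemma segDL_nil (W N H s : Int) (hW : 0 < W) (hN : N ≤ 0) (hs : 0 ≤ s) :
    pvSegDL W N H s = [] := by
  unfold pvSegDL
  by_cases hcase : s < W
  · simp only [if_pos hcase]
    have hfil : (PySem.List.pyRange 0 (min H (W - 1 - s + 1)) 1).filter
        (fun r => decide (r * (W - 1) + (W - 1 - s) < N)) = [] := by
      rw [List.filter_eq_nil_iff]
      intro r hr
      have hmem := PySem.List.mem_pyRange_one.mp hr
      simp only [decide_eq_true_eq, not_lt]
      have h1 : (0:Int) ≤ r * (W - 1) := mul_nonneg hmem.1 (by omega)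
      omega
    rw [hfil, List.map_nil]
  · simp only [if_neg hcase]
    have hfil : (PySem.List.pyRange (s - W + 1) (min H (s + 1)) 1).filter
        (fun r => decide (r * (W - 1) + s < N)) = [] := by
      rw [List.filter_eq_nil_iff]
      intro r hr
      have hmem := PySem.List.mem_pyRange_one.mp hr
      simp only [decide_eq_true_eq, not_lt]
      have h1 : (0:Int) ≤ r * (W - 1) :=
        mul_nonneg (by have := hmem.1; omega) (by omega)
      omega
    rw [hfil, List.map_nil]

-- ---- branch equalities ----

-- A's down_right branch as a flatMap of diagonal segments (0 < W)
lemma branchDR_A (W N : Int) (hW : 0 < W) :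
    (PySem.List.pyRange 0 (W + PySem.Int.floordiv (N + W - 1) W - 1) 1).foldl (fun perm start =>
      let rc := if start < W then ((0 : Int), start) else (start - W + 1, (0 : Int))
      pvWalkDR (pvGridFill W N (PySem.Int.floordiv (N + W - 1) W)).1
        (PySem.Int.floordiv (N + W - 1) W) W rc.1 rc.2 perm) [] =
    (PySem.List.pyRange 0 (W + PySem.Int.floordiv (N + W - 1) W - 1) 1).flatMap
      (fun s => pvSegDR W N (PySem.Int.floordiv (N + W - 1) W) s) := by
  set H := PySem.Int.floordiv (N + W - 1) W with hH
  have hcongr : ∀ (acc : List Int), ∀ s ∈ PySem.List.pyRange 0 (W + H - 1) 1,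
      (let rc := if s < W then ((0 : Int), s) else (s - W + 1, (0 : Int))
       pvWalkDR (pvGridFill W N H).1 H W rc.1 rc.2 acc) = acc ++ pvSegDR W N H s := by
    intro acc s hmem
    have h0 : 0 ≤ s := (PySem.List.mem_pyRange_one.mp hmem).1
    by_cases hs : s < W
    · simp only [if_pos hs]
      have h := walkDR_eq W N H s (H - 0).toNat 0 acc rfl (le_refl 0) (by omega)
      rw [show (0 : Int) + s = s from by omega] at h
      rw [h, PySem.List.foldl_append_ite (fun r => r * (W + 1) + s < N) (fun r => r * (W + 1) + s)]
      unfold pvSegDR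
      simp only [if_pos hs]
    · simp only [if_neg hs]
      have h := walkDR_eq W N H (-(s - W + 1)) (H - (s - W + 1)).toNat (s - W + 1) acc rfl
        (by omega) (by omega)
      rw [show (s - W + 1) + -(s - W + 1) = (0 : Int) from by ring] at h
      rw [h, PySem.List.foldl_append_ite (fun r => r * (W + 1) + -(s - W + 1) < N)
        (fun r => r * (W + 1) + -(s - W + 1))]
      unfold pvSegDR
      simp only [if_neg hs]
  refine Eq.trans (PySem.List.foldl_congr_mem _ _ (fun acc s => acc ++ pvSegDR W N H s) _ hcongr) ?_
  rw [PySem.List.foldl_append_eq_flatMap]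
  simp

-- A's down_left branch as a flatMap of diagonal segments (0 < W)
lemma branchDL_A (W N : Int) (hW : 0 < W) :
    (PySem.List.pyRange 0 (W + PySem.Int.floordiv (N + W - 1) W - 1) 1).foldl (fun perm start =>
      let rc := if start < W then ((0 : Int), W - 1 - start) else (start - W + 1, W - 1)
      pvWalkDL (pvGridFill W N (PySem.Int.floordiv (N + W - 1) W)).1
        (PySem.Int.floordiv (N + W - 1) W) W rc.1 rc.2 perm) [] =
    (PySem.List.pyRange 0 (W + PySem.Int.floordiv (N + W - 1) W - 1) 1).flatMap
      (fun s => pvSegDL W N (PySem.Int.floordiv (N + W - 1) W) s) := by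
  set H := PySem.Int.floordiv (N + W - 1) W with hH
  have hcongr : ∀ (acc : List Int), ∀ s ∈ PySem.List.pyRange 0 (W + H - 1) 1,
      (let rc := if s < W then ((0 : Int), W - 1 - s) else (s - W + 1, W - 1)
       pvWalkDL (pvGridFill W N H).1 H W rc.1 rc.2 acc) = acc ++ pvSegDL W N H s := by
    intro acc s hmem
    have h0 : 0 ≤ s := (PySem.List.mem_pyRange_one.mp hmem).1
    by_cases hs : s < W
    · simp only [if_pos hs]
      rw [walkDL_eq W N H 0 (W - 1 - s) acc (le_refl 0) (by omega)]
      rw [show (0 : Int) + (W - 1 - s) + 1 = W - 1 - s + 1 from by ring]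
      have hf : (fun (perm : List Int) (r : Int) =>
          if r * (W - 1) + 0 + (W - 1 - s) < N then perm ++ [r * (W - 1) + 0 + (W - 1 - s)] else perm) =
          (fun (perm : List Int) (r : Int) =>
          if r * (W - 1) + (W - 1 - s) < N then perm ++ [r * (W - 1) + (W - 1 - s)] else perm) := by
        funext perm r
        rw [show r * (W - 1) + 0 + (W - 1 - s) = r * (W - 1) + (W - 1 - s) from by ring]
      rw [hf, PySem.List.foldl_append_ite (fun r => r * (W - 1) + (W - 1 - s) < N)
        (fun r => r * (W - 1) + (W - 1 - s))]
      unfold pvSegDL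
      simp only [if_pos hs]
    · simp only [if_neg hs]
      rw [walkDL_eq W N H (s - W + 1) (W - 1) acc (by omega) (by omega)]
      rw [show s - W + 1 + (W - 1) + 1 = s + 1 from by ring]
      have hf : (fun (perm : List Int) (r : Int) =>
          if r * (W - 1) + (s - W + 1) + (W - 1) < N then perm ++ [r * (W - 1) + (s - W + 1) + (W - 1)] else perm) =
          (fun (perm : List Int) (r : Int) =>
          if r * (W - 1) + s < N then perm ++ [r * (W - 1) + s] else perm) := by
        funext perm r
        rw [show r * (W - 1) + (s - W + 1) + (W - 1) = r * (W - 1) + s from by ring]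
      rw [hf, PySem.List.foldl_append_ite (fun r => r * (W - 1) + s < N)
        (fun r => r * (W - 1) + s)]
      unfold pvSegDL
      simp only [if_neg hs]
  refine Eq.trans (PySem.List.foldl_congr_mem _ _ (fun acc s => acc ++ pvSegDL W N H s) _ hcongr) ?_
  rw [PySem.List.foldl_append_eq_flatMap]
  simp

-- B's bucket emission as a flatMap of row-major filters
lemma branchB_flatMap (keys : List Int) (keyf : Int → Int) (N : Int) :
    keys.flatMap (fun k => (pvBuckets keys keyf N).getD k []) =
    keys.flatMap (fun k => (PySem.List.pyRange 0 N 1).filter (fun i => keyf i == k)) := by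
  have hf : (fun k => (pvBuckets keys keyf N).getD k []) =
      (fun k => (PySem.List.pyRange 0 N 1).filter (fun i => keyf i == k)) := by
    funext k
    exact buckets_getD keys keyf N k
  rw [hf]

-- the down_right branch of the two ports agrees (W ≠ 0)
lemma branchDR_eq (W N : Int) (hW : W ≠ 0) :
    (PySem.List.pyRange 0 (W + PySem.Int.floordiv (N + W - 1) W - 1) 1).foldl (fun perm start =>
      let rc := if start < W then ((0 : Int), start) else (start - W + 1, (0 : Int))
      pvWalkDR (pvGridFill W N (PySem.Int.floordiv (N + W - 1) W)).1
        (PySem.Int.floordiv (N + W - 1) W) W rc.1 rc.2 perm) [] =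
    (pvKeysDR W (PySem.Int.floordiv (N + W - 1) W)).flatMap (fun k =>
      (pvBuckets (pvKeysDR W (PySem.Int.floordiv (N + W - 1) W))
        (fun i => PySem.Int.mod i W - PySem.Int.floordiv i W) N).getD k []) := by
  set H := PySem.Int.floordiv (N + W - 1) W with hH
  rw [branchB_flatMap]
  rcases lt_or_gt_of_ne hW with hneg | hpos
  · -- W < 0 : both sides are []
    have hA : ∀ (acc : List Int), ∀ s ∈ PySem.List.pyRange 0 (W + H - 1) 1,
        (let rc := if s < W then ((0 : Int), s) else (s - W + 1, (0 : Int))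
         pvWalkDR (pvGridFill W N H).1 H W rc.1 rc.2 acc) = acc := by
      intro acc s hmem
      have h0 : 0 ≤ s := (PySem.List.mem_pyRange_one.mp hmem).1
      simp only [if_neg (show ¬ s < W by omega)]
      rw [pvWalkDR, dif_neg (by omega)]
    refine Eq.trans (PySem.List.foldl_congr_mem _ _ (fun acc _ => acc) _ hA) ?_
    rw [PySem.List.foldl_ignore]
    by_cases hN : 0 < N
    · have hH1 : H ≤ 1 := height_le_one_of_neg W N hneg hN
      have hk : pvKeysDR W H = [] := by
        unfold pvKeysDR
        rw [PySem.List.pyRange_one_eq_nil (by omega), PySem.List.pyRange_one_eq_nil (by omega)]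
        simp
      rw [hk]
      simp
    · rw [PySem.List.pyRange_one_eq_nil (by omega : N ≤ 0)]
      simp
  · -- 0 < W
    rw [branchDR_A W N hpos]
    by_cases hN : 0 < N
    · have hH1 : 1 ≤ H := height_pos W N hpos hN
      rw [keysDR_eq W H hpos hH1, List.flatMap_map, List.flatMap_def, List.flatMap_def]
      apply congrArg
      apply List.map_congr_left
      intro s hmem
      have hs0 : 0 ≤ s := (PySem.List.mem_pyRange_one.mp hmem).1
      by_cases hcase : s < W
      · simp only [if_pos hcase]
        unfold pvSegDR
        simp only [if_pos hcase]
        exact (F_DR W N s 0 hpos (by omega)).symm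
      · simp only [if_neg hcase]
        unfold pvSegDR
        simp only [if_neg hcase]
        exact (F_DR W N (-(s - W + 1)) (s - W + 1) hpos (by omega)).symm
    · -- N ≤ 0 : every segment and every bucket is empty
      rw [List.flatMap_eq_nil_iff.mpr (fun s hmem =>
        segDR_nil W N H s hpos (by omega) (PySem.List.mem_pyRange_one.mp hmem).1)]
      rw [PySem.List.pyRange_one_eq_nil (by omega : N ≤ 0)]
      simp

-- the down_left branch of the two ports agrees (W ≠ 0)
lemma branchDL_eq (W N : Int) (hW : W ≠ 0) :
    (PySem.List.pyRange 0 (W + PySem.Int.floordiv (N + W - 1) W - 1) 1).foldl (fun perm start =>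
      let rc := if start < W then ((0 : Int), W - 1 - start) else (start - W + 1, W - 1)
      pvWalkDL (pvGridFill W N (PySem.Int.floordiv (N + W - 1) W)).1
        (PySem.Int.floordiv (N + W - 1) W) W rc.1 rc.2 perm) [] =
    (pvKeysDL W (PySem.Int.floordiv (N + W - 1) W)).flatMap (fun k =>
      (pvBuckets (pvKeysDL W (PySem.Int.floordiv (N + W - 1) W))
        (fun i => PySem.Int.mod i W + PySem.Int.floordiv i W) N).getD k []) := by
  set H := PySem.Int.floordiv (N + W - 1) W with hH
  rw [branchB_flatMap]
  rcases lt_or_gt_of_ne hW with hneg | hpos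
  · have hA : ∀ (acc : List Int), ∀ s ∈ PySem.List.pyRange 0 (W + H - 1) 1,
        (let rc := if s < W then ((0 : Int), W - 1 - s) else (s - W + 1, W - 1)
         pvWalkDL (pvGridFill W N H).1 H W rc.1 rc.2 acc) = acc := by
      intro acc s hmem
      have h0 : 0 ≤ s := (PySem.List.mem_pyRange_one.mp hmem).1
      simp only [if_neg (show ¬ s < W by omega)]
      rw [pvWalkDL, dif_neg (by omega)]
    refine Eq.trans (PySem.List.foldl_congr_mem _ _ (fun acc _ => acc) _ hA) ?_
    rw [PySem.List.foldl_ignore]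
    by_cases hN : 0 < N
    · have hH1 : H ≤ 1 := height_le_one_of_neg W N hneg hN
      have hk : pvKeysDL W H = [] := by
        unfold pvKeysDL
        rw [PySem.List.pyRange_neg_one_eq_nil (by omega), PySem.List.pyRange_one_eq_nil (by omega)]
        simp
      rw [hk]
      simp
    · rw [PySem.List.pyRange_one_eq_nil (by omega : N ≤ 0)]
      simp
  · rw [branchDL_A W N hpos]
    by_cases hN : 0 < N
    · have hH1 : 1 ≤ H := height_pos W N hpos hN
      rw [keysDL_eq W H hpos hH1, List.flatMap_map, List.flatMap_def, List.flatMap_def]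
      apply congrArg
      apply List.map_congr_left
      intro s hmem
      have hs0 : 0 ≤ s := (PySem.List.mem_pyRange_one.mp hmem).1
      by_cases hcase : s < W
      · simp only [if_pos hcase]
        unfold pvSegDL
        simp only [if_pos hcase]
        exact (F_DL W N (W - 1 - s) 0 hpos (by omega)).symm
      · simp only [if_neg hcase]
        unfold pvSegDL
        simp only [if_neg hcase]
        exact (F_DL W N s (s - W + 1) hpos (by omega)).symm
    · rw [List.flatMap_eq_nil_iff.mpr (fun s hmem =>
        segDL_nil W N H s hpos (by omega) (PySem.List.mem_pyRange_one.mp hmem).1)]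
      rw [PySem.List.pyRange_one_eq_nil (by omega : N ≤ 0)]
      simp

lemma ports_eq (width text_len : Int) (direction : String) (hW : width ≠ 0) :
    diagonal_route_perm width text_len direction = diagonal_route_perm_alt width text_len direction := by
  simp only [diagonal_route_perm, diagonal_route_perm_alt]
  by_cases h1 : direction = "down_right"
  · simp only [if_pos h1, branchDR_eq width text_len hW]
  · by_cases h2 : direction = "down_left"
    · simp only [if_neg h1, if_pos h2, branchDL_eq width text_len hW]
    · by_cases h3 : direction = "spiral"
      · simp only [if_neg h1, if_neg h2, if_pos h3, branchSpiral]
      · simp only [if_neg h1, if_neg h2, if_neg h3]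

-- ===== VERDICT (by name: the statement is the Claim_ definition above) =====
theorem diagonal_route_perm_spec : Claim_equal_diagonal_route_perm := by
  intro width text_len direction _ hpre
  unfold Spec_diagonal_route_perm
  exact ports_eq width text_len direction hpre
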